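-- pv_equiv track=rewrite | github.com/BudEcosystem/vllm | vllm_monitor/analyzers.py | _determine_failure_type
-- ===== SOURCE A (Python) =====
-- from typing import Any, Dict, List, Optional, Tuple, Set
--
-- def _determine_failure_type(
--                           failure_indicators: List[str],
--                           warning_signs: List[str]) -> str:
--     """Determine the most likely type of failure."""
--     all_indicators = failure_indicators + warning_signs
--
--     if any('memory' in indicator for indicator in all_indicators):
--         return "memory_exhaustion"
--     elif any('cpu' in indicator for indicator in all_indicators):
--         return "cpu_exhaustion"
--     elif any('error' in indicator for indicator in all_indicators):
--         return "error_cascade"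
--     elif any('health' in indicator for indicator in all_indicators):
--         return "component_degradation"
--     elif any('cache' in indicator for indicator in all_indicators):
--         return "cache_overflow"
--     elif any('queue' in indicator for indicator in all_indicators):
--         return "request_backlog"
--     else:
--         return "general_instability"
-- ===== SOURCE B (Python) =====
-- _KEYWORDS = ['memory', 'cpu', 'error', 'health', 'cache', 'queue']
-- _PRIORITY = [
--     ('memory', 'memory_exhaustion'),
--     ('cpu', 'cpu_exhaustion'),
--     ('error', 'error_cascade'),
--     ('health', 'component_degradation'),
--     ('cache', 'cache_overflow'),
--     ('queue', 'request_backlog'),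
-- ]
--
-- def _determine_failure_type(failure_indicators, warning_signs):
--     """Single pass: index which keywords occur anywhere, then a priority lookup."""
--     found = set()
--     for indicator in failure_indicators + warning_signs:
--         for kw in _KEYWORDS:
--             if kw in indicator:
--                 found.add(kw)
--     for kw, result in _PRIORITY:
--         if kw in found:
--             return result
--     return "general_instability"
-- ===== Notes on version B (the rewrite author's own statement) =====
-- stated objective: alternative
-- what changed: Replaces six repeated any()-scans over the concatenated list with one pass that builds a set of found keywords, followed by a priority-table lookup for the first keyword present.
import Mathlib
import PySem

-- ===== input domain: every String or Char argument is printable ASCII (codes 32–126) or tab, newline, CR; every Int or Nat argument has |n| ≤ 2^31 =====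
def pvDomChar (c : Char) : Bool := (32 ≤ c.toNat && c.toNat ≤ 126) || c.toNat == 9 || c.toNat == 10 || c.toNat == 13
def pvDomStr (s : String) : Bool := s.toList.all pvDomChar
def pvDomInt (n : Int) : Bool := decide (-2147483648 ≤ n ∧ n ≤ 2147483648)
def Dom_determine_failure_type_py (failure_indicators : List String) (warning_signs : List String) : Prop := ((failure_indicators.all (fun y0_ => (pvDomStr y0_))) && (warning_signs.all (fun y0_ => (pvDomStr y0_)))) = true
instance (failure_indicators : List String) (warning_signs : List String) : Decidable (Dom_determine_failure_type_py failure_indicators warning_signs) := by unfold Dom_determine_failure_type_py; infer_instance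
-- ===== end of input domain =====

-- B builds a set index of found keywords in one pass, then does a priority-table lookup (alternative decomposition).


-- ===== PORT A =====
def determine_failure_type_py (failure_indicators : List String) (warning_signs : List String) : String :=
  let all_indicators := failure_indicators ++ warning_signs
  if all_indicators.any (fun indicator => PySem.Str.isIn "memory" indicator) then "memory_exhaustion"
  else if all_indicators.any (fun indicator => PySem.Str.isIn "cpu" indicator) then "cpu_exhaustion"
  else if all_indicators.any (fun indicator => PySem.Str.isIn "error" indicator) then "error_cascade"
  else if all_indicators.any (fun indicator => PySem.Str.isIn "health" indicator) then "component_degradation"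
  else if all_indicators.any (fun indicator => PySem.Str.isIn "cache" indicator) then "cache_overflow"
  else if all_indicators.any (fun indicator => PySem.Str.isIn "queue" indicator) then "request_backlog"
  else "general_instability"

-- ===== PORT B =====
def pvKeywords : List String := ["memory", "cpu", "error", "health", "cache", "queue"]
def pvPriority : List (String × String) :=
  [("memory", "memory_exhaustion"), ("cpu", "cpu_exhaustion"), ("error", "error_cascade"),
   ("health", "component_degradation"), ("cache", "cache_overflow"), ("queue", "request_backlog")]

def determine_failure_type_py_alt (failure_indicators : List String) (warning_signs : List String) : String :=
  let found : PySem.Set String :=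
    (failure_indicators ++ warning_signs).foldl
      (fun s indicator =>
        pvKeywords.foldl (fun s kw => if PySem.Str.isIn kw indicator then PySem.Set.add s kw else s) s)
      PySem.Set.empty
  match pvPriority.find? (fun p => PySem.Set.contains found p.1) with
  | some p => p.2
  | none => "general_instability"

-- ===== PRECONDITION & SPEC =====
def Spec_determine_failure_type_py (failure_indicators : List String) (warning_signs : List String) (out : String) : Prop := out = determine_failure_type_py_alt failure_indicators warning_signs
instance (failure_indicators : List String) (warning_signs : List String) (out : String) : Decidable (Spec_determine_failure_type_py failure_indicators warning_signs out) := by unfold Spec_determine_failure_type_py; infer_instance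

-- ===== CLAIM (what is proved, stated in full; the proofs are below) =====
def Claim_equal_determine_failure_type_py : Prop := ∀ (failure_indicators : List String) (warning_signs : List String), Dom_determine_failure_type_py failure_indicators warning_signs → Spec_determine_failure_type_py failure_indicators warning_signs (determine_failure_type_py failure_indicators warning_signs)

-- ===== LEMMAS AND PROOFS =====

-- membership in the inner keyword fold
theorem mem_inner_fold (kws : List String) (s : PySem.Set String) (ind kw : String) :
    kw ∈ kws.foldl (fun s k => if PySem.Str.isIn k ind then PySem.Set.add s k else s) s ↔
      kw ∈ s ∨ (kw ∈ kws ∧ PySem.Str.isIn kw ind = true) := by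
  induction kws generalizing s with
  | nil => simp
  | cons k t ih =>
      simp only [List.foldl_cons, ih, List.mem_cons]
      by_cases h : PySem.Str.isIn k ind = true
      · simp only [h, if_pos]
        rw [PySem.Set.mem_add]
        constructor
        · rintro ((hs | rfl) | ht)
          · exact Or.inl hs
          · exact Or.inr ⟨Or.inl rfl, h⟩
          · exact Or.inr ⟨Or.inr ht.1, ht.2⟩
        · rintro (hs | ⟨(rfl | ht), hin⟩)
          · exact Or.inl (Or.inl hs)
          · exact Or.inl (Or.inr rfl)
          · exact Or.inr ⟨ht, hin⟩
      · simp only [h, if_neg, Bool.false_eq_true, not_false_iff]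
        constructor
        · rintro (hs | ht)
          · exact Or.inl hs
          · exact Or.inr ⟨Or.inr ht.1, ht.2⟩
        · rintro (hs | ⟨(rfl | ht), hin⟩)
          · exact Or.inl hs
          · exact absurd hin h
          · exact Or.inr ⟨ht, hin⟩

-- membership in the whole index
theorem mem_outer_fold (inds : List String) (s : PySem.Set String) (kw : String) :
    kw ∈ inds.foldl
        (fun s indicator =>
          pvKeywords.foldl (fun s k => if PySem.Str.isIn k indicator then PySem.Set.add s k else s) s) s ↔
      kw ∈ s ∨ (kw ∈ pvKeywords ∧ inds.any (fun i => PySem.Str.isIn kw i) = true) := by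
  induction inds generalizing s with
  | nil => simp
  | cons i t ih =>
      simp only [List.foldl_cons, ih, mem_inner_fold, List.any_cons, Bool.or_eq_true]
      tauto

theorem contains_found (inds : List String) (kw : String) (hkw : kw ∈ pvKeywords) :
    PySem.Set.contains
        (inds.foldl
          (fun s indicator =>
            pvKeywords.foldl (fun s k => if PySem.Str.isIn k indicator then PySem.Set.add s k else s) s)
          PySem.Set.empty) kw = inds.any (fun i => PySem.Str.isIn kw i) := by
  rcases h : inds.any (fun i => PySem.Str.isIn kw i) with _ | _
  · rw [Bool.eq_false_iff, Ne, PySem.Set.contains_iff, mem_outer_fold]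
    rintro (hs | ⟨_, hany⟩)
    · simp [PySem.Set.empty] at hs
    · rw [h] at hany; exact Bool.false_ne_true hany
  · rw [PySem.Set.contains_iff, mem_outer_fold]
    exact Or.inr ⟨hkw, h⟩

-- ===== VERDICT (by name: the statement is the Claim_ definition above) =====
theorem determine_failure_type_py_spec : Claim_equal_determine_failure_type_py := by
  intro fi wi _
  unfold Spec_determine_failure_type_py determine_failure_type_py determine_failure_type_py_alt
  simp only [pvPriority, List.find?]
  rw [contains_found _ _ (by simp [pvKeywords]),
      contains_found _ _ (by simp [pvKeywords]),
      contains_found _ _ (by simp [pvKeywords]),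
      contains_found _ _ (by simp [pvKeywords]),
      contains_found _ _ (by simp [pvKeywords]),
      contains_found _ _ (by simp [pvKeywords])]
  rcases h1 : (fi ++ wi).any (fun i => PySem.Str.isIn "memory" i) <;>
  rcases h2 : (fi ++ wi).any (fun i => PySem.Str.isIn "cpu" i) <;>
  rcases h3 : (fi ++ wi).any (fun i => PySem.Str.isIn "error" i) <;>
  rcases h4 : (fi ++ wi).any (fun i => PySem.Str.isIn "health" i) <;>
  rcases h5 : (fi ++ wi).any (fun i => PySem.Str.isIn "cache" i) <;>
  rcases h6 : (fi ++ wi).any (fun i => PySem.Str.isIn "queue" i) <;>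
  simp [h1, h2, h3, h4]
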